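-- pv_equiv track=rewrite | github.com/iammoda/coding_problems | same bsts/same_bsts.py | sameBsts
-- ===== SOURCE A (Python) =====
-- def sameBsts(arrayOne, arrayTwo):
--     if len(arrayOne) != len(arrayTwo):
--         return False
--     if len(arrayOne) == 0 and len(arrayTwo) == 0:
--         return True
--     if arrayOne[0] != arrayTwo[0]:
--         return False
--
--     leftOne = smallerThan(arrayOne)
--     leftTwo = smallerThan(arrayTwo)
--     rightOne = largerThan(arrayOne)
--     rightTwo = largerThan(arrayTwo)
--
--     return sameBsts(leftOne, leftTwo) and sameBsts(rightOne, rightTwo)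
--
-- def smallerThan(array):
--     smaller = []
--     for i in range(1, len(array)):
--         if array[i] < array[0]:
--             smaller.append(array[i])
--     return smaller
--
-- def largerThan(array):
--     larger = []
--     for i in range(1, len(array)):
--         if array[i] >= array[0]:
--             larger.append(array[i])
--     return larger
-- ===== SOURCE B (Python) =====
-- def _insert(t, v):
--     if t is None:
--         return (v, None, None)
--     w, l, r = t
--     if v < w:
--         return (w, _insert(l, v), r)
--     return (w, l, _insert(r, v))
--
--
-- def _build(arr):
--     t = None
--     for v in arr:
--         t = _insert(t, v)
--     return t
--
--
-- def sameBsts(arrayOne, arrayTwo):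
--     return _build(arrayOne) == _build(arrayTwo)
-- ===== Notes on version B (the rewrite author's own statement) =====
-- stated objective: alternative
-- what changed: B actually builds the BST of each array by successive insertion and compares the two trees structurally, instead of A's recursive same-root/partition-and-recurse comparison of the two arrays.
import Mathlib
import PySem

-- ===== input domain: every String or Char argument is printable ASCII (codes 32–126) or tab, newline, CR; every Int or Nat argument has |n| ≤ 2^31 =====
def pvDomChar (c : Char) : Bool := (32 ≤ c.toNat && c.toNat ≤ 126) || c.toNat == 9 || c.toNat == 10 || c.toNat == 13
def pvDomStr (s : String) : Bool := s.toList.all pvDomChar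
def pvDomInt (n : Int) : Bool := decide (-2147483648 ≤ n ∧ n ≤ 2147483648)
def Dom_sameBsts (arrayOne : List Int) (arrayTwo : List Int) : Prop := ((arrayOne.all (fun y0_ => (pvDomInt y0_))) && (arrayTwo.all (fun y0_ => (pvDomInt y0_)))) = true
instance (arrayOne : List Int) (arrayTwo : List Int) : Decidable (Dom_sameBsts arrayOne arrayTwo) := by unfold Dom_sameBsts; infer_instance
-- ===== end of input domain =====

-- B builds the BST of each array by successive insertion and compares the trees,
-- instead of A's recursive partition-and-compare on the arrays (alternative algorithm, similar cost).


-- ===== PORT A =====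
-- 'smaller = []; for i in range(1, len(array)): if array[i] < array[0]: smaller.append(array[i])'
def smallerThan (array : List Int) : List Int :=
  match array with
  | [] => []
  | a0 :: rest => rest.foldl (fun smaller x => if x < a0 then smaller ++ [x] else smaller) []

def largerThan (array : List Int) : List Int :=
  match array with
  | [] => []
  | a0 :: rest => rest.foldl (fun larger x => if x ≥ a0 then larger ++ [x] else larger) []

theorem smallerThan_length_lt (a0 : Int) (rest : List Int) :
    (smallerThan (a0 :: rest)).length < (a0 :: rest).length := by
  simp only [smallerThan, PySem.List.foldl_append_ite_eq_filter, List.nil_append]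
  have := List.length_filter_le (fun x => decide (x < a0)) rest
  simp only [List.length_cons]; omega

theorem largerThan_length_lt (a0 : Int) (rest : List Int) :
    (largerThan (a0 :: rest)).length < (a0 :: rest).length := by
  simp only [largerThan, PySem.List.foldl_append_ite_eq_filter, List.nil_append]
  have := List.length_filter_le (fun x => decide (x ≥ a0)) rest
  simp only [List.length_cons]; omega

def sameBsts (arrayOne : List Int) (arrayTwo : List Int) : Bool :=
  if arrayOne.length ≠ arrayTwo.length then false
  else if arrayOne.length = 0 ∧ arrayTwo.length = 0 then true
  else if PySem.List.pyGet? arrayOne 0 ≠ PySem.List.pyGet? arrayTwo 0 then false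
  else
    sameBsts (smallerThan arrayOne) (smallerThan arrayTwo) &&
    sameBsts (largerThan arrayOne) (largerThan arrayTwo)
termination_by arrayOne.length
decreasing_by
  · match arrayOne with
    | [] => simp_all
    | a0 :: rest => exact smallerThan_length_lt a0 rest
  · match arrayOne with
    | [] => simp_all
    | a0 :: rest => exact largerThan_length_lt a0 rest

-- ===== PORT B =====
inductive PvTree where
  | leaf : PvTree
  | node : Int → PvTree → PvTree → PvTree
deriving DecidableEq, Repr

def pvInsert (t : PvTree) (v : Int) : PvTree :=
  match t with
  | .leaf => .node v .leaf .leaf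
  | .node w l r => if v < w then .node w (pvInsert l v) r else .node w l (pvInsert r v)

def pvBuild (arr : List Int) : PvTree := arr.foldl pvInsert .leaf

def sameBsts_alt (arrayOne : List Int) (arrayTwo : List Int) : Bool :=
  pvBuild arrayOne == pvBuild arrayTwo

-- ===== PRECONDITION & SPEC =====
def Spec_sameBsts (arrayOne : List Int) (arrayTwo : List Int) (out : Bool) : Prop := out = sameBsts_alt arrayOne arrayTwo
instance (arrayOne : List Int) (arrayTwo : List Int) (out : Bool) : Decidable (Spec_sameBsts arrayOne arrayTwo out) := by unfold Spec_sameBsts; infer_instance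

-- ===== CLAIM (what is proved, stated in full; the proofs are below) =====
def Claim_equal_sameBsts : Prop := ∀ (arrayOne : List Int) (arrayTwo : List Int), Dom_sameBsts arrayOne arrayTwo → Spec_sameBsts arrayOne arrayTwo (sameBsts arrayOne arrayTwo)

-- ===== LEMMAS AND PROOFS =====
def PvTree.size : PvTree → Nat
  | .leaf => 0
  | .node _ l r => l.size + r.size + 1

theorem size_pvInsert (t : PvTree) (v : Int) : (pvInsert t v).size = t.size + 1 := by
  induction t with
  | leaf => rfl
  | node w l r ihl ihr =>
    simp only [pvInsert]
    split <;> simp [PvTree.size, ihl, ihr] <;> omega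

theorem size_foldl_pvInsert (xs : List Int) (t : PvTree) :
    (xs.foldl pvInsert t).size = t.size + xs.length := by
  induction xs generalizing t with
  | nil => simp
  | cons x xs ih => simp [List.foldl_cons, ih, size_pvInsert]; omega

theorem size_pvBuild (xs : List Int) : (pvBuild xs).size = xs.length := by
  unfold pvBuild
  simpa [PvTree.size] using size_foldl_pvInsert xs .leaf

theorem pvBuild_eq_leaf_iff (xs : List Int) : pvBuild xs = .leaf ↔ xs = [] := by
  constructor
  · intro h
    have := size_pvBuild xs
    rw [h] at this
    simpa [PvTree.size] using (List.length_eq_zero_iff.mp this.symm)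
  · intro h; subst h; rfl

theorem foldl_pvInsert_node (xs : List Int) (w : Int) (l r : PvTree) :
    xs.foldl pvInsert (.node w l r) =
      .node w ((xs.filter (fun x => x < w)).foldl pvInsert l)
             ((xs.filter (fun x => w ≤ x)).foldl pvInsert r) := by
  induction xs generalizing l r with
  | nil => simp
  | cons x xs ih =>
    by_cases h : x < w
    · have h' : ¬ w ≤ x := not_le.mpr h
      simp [List.foldl_cons, pvInsert, h, h', ih]
    · have h' : w ≤ x := not_lt.mp h
      simp [List.foldl_cons, pvInsert, h, h', ih]

theorem pvBuild_cons (x : Int) (xs : List Int) :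
    pvBuild (x :: xs) =
      .node x (pvBuild (xs.filter (fun v => v < x))) (pvBuild (xs.filter (fun v => x ≤ v))) := by
  simp [pvBuild, List.foldl_cons, pvInsert, foldl_pvInsert_node]

theorem smallerThan_cons (x : Int) (xs : List Int) :
    smallerThan (x :: xs) = xs.filter (fun v => v < x) := by
  simp [smallerThan, PySem.List.foldl_append_ite_eq_filter]

theorem largerThan_cons (x : Int) (xs : List Int) :
    largerThan (x :: xs) = xs.filter (fun v => x ≤ v) := by
  simp only [largerThan, PySem.List.foldl_append_ite_eq_filter, List.nil_append, ge_iff_le]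

theorem sameBsts_eq_tree_eq (n : Nat) :
    ∀ (a b : List Int), a.length ≤ n → sameBsts a b = (pvBuild a == pvBuild b) := by
  induction n with
  | zero =>
    intro a b ha
    have ha' : a = [] := List.length_eq_zero_iff.mp (Nat.le_zero.mp ha)
    subst ha'
    rw [sameBsts]
    by_cases hb : b.length = 0
    · have : b = [] := List.length_eq_zero_iff.mp hb
      subst this; simp
    · have hbne : b ≠ [] := by intro h; subst h; simp at hb
      have : pvBuild b ≠ PvTree.leaf := fun h => hbne ((pvBuild_eq_leaf_iff b).mp h)
      simp only [List.length_nil]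
      rw [if_pos (by omega)]
      simp [pvBuild]
      exact fun h => this h.symm
  | succ n ih =>
    intro a b ha
    match a with
    | [] => exact ih [] b (by simp)
    | x :: xs =>
      rw [sameBsts]
      by_cases hlen : (x :: xs).length ≠ b.length
      · rw [if_pos hlen]
        have : (pvBuild (x :: xs)).size ≠ (pvBuild b).size := by
          rw [size_pvBuild, size_pvBuild]; exact hlen
        have hne : pvBuild (x :: xs) ≠ pvBuild b := fun h => this (by rw [h])
        simp [hne]
      · rw [if_neg hlen]
        rw [not_ne_iff] at hlen
        match b with
        | [] => simp at hlen
        | y :: ys =>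
          rw [if_neg (by simp)]
          by_cases hx : x = y
          · subst hx
            rw [if_neg (by simp)]
            have h1 : (smallerThan (x :: xs)).length ≤ n := by
              have := smallerThan_length_lt x xs
              simp only [List.length_cons] at this ha ⊢; omega
            have h2 : (largerThan (x :: xs)).length ≤ n := by
              have := largerThan_length_lt x xs
              simp only [List.length_cons] at this ha ⊢; omega
            rw [ih _ (smallerThan (x :: ys)) h1, ih _ (largerThan (x :: ys)) h2]
            rw [smallerThan_cons, smallerThan_cons, largerThan_cons, largerThan_cons,
              pvBuild_cons, pvBuild_cons]
            rw [Bool.eq_iff_iff]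
            simp only [Bool.and_eq_true, beq_iff_eq, PvTree.node.injEq, true_and]
          · rw [if_pos (by simp [hx])]
            rw [pvBuild_cons, pvBuild_cons]
            simp [PvTree.node.injEq, hx]

-- ===== VERDICT (by name: the statement is the Claim_ definition above) =====
theorem sameBsts_spec : Claim_equal_sameBsts := by
  intro arrayOne arrayTwo _
  unfold Spec_sameBsts sameBsts_alt
  exact sameBsts_eq_tree_eq arrayOne.length arrayOne arrayTwo (le_refl _)
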